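-- pv_equiv track=rewrite | github.com/cbmckinstry/Pre-Clustering1 | Master.py | unused
-- ===== SOURCE A (Python) =====
-- def unused(allocations,combos):
--     indeces=list(range(len(allocations)))
--     unused=[]
--     used=[]
--     for combo in combos:
--         for index in combo:
--             used.append(index)
--     for elem in indeces:
--         if elem+1 not in used:
--             unused.append(elem+1)
--     return unused
-- ===== SOURCE B (Python) =====
-- def unused(allocations, combos):
--     used = sorted(i for combo in combos for i in combo)
--     result = []
--     j = 0
--     m = len(used)
--     for cand in range(1, len(allocations) + 1):
--         while j < m and used[j] < cand:
--             j += 1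
--         if j < m and used[j] == cand:
--             continue
--         result.append(cand)
--     return result
-- ===== Notes on version B (the rewrite author's own statement) =====
-- stated objective: faster
-- what changed: B sorts the flattened used indices once and then performs a single two-pointer merge scan against the increasing candidates 1..n (sorted set-difference), replacing A's per-candidate linear membership scan of the used list.
import Mathlib
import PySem

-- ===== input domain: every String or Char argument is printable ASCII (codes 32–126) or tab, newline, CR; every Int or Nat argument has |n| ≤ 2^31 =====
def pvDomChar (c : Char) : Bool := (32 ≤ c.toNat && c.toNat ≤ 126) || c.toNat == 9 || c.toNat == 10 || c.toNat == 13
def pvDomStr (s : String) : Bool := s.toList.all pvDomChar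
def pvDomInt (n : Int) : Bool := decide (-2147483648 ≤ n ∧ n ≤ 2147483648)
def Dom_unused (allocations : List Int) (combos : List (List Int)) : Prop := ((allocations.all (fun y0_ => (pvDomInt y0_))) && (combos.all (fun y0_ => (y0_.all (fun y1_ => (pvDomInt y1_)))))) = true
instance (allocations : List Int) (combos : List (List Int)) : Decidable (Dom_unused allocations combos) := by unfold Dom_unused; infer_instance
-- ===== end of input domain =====

-- B sorts the flattened used indices once and then does a single two-pointer merge scan
-- against the increasing candidates 1..n (sorted set-difference), replacing A's
-- per-candidate linear membership scan.

-- ===== PORT A =====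
def unused (allocations : List Int) (combos : List (List Int)) : List Int :=
  let indeces := PySem.List.pyRange 0 allocations.length 1
  let used := combos.foldl (fun used combo => combo.foldl (fun used index => used ++ [index]) used) ([] : List Int)
  indeces.foldl (fun acc elem => if (elem + 1) ∈ used then acc else acc ++ [elem + 1]) []

-- ===== PORT B =====
-- the for-loop over candidates with the inner while advancing index j; the suffix of
-- `used` from position j is carried as the second argument (j only moves forward).
def unusedMerge (cands used : List Int) : List Int :=
  match cands with
  | [] => []
  | c :: cs =>
      let rest := used.dropWhile (fun u => decide (u < c))   -- the inner while loop
      match rest with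
      | u :: _ => if u = c then unusedMerge cs rest else c :: unusedMerge cs rest
      | [] => c :: unusedMerge cs []

def unused_alt (allocations : List Int) (combos : List (List Int)) : List Int :=
  let used := PySem.List.sorted combos.flatten (fun x => x) false
  unusedMerge (PySem.List.pyRange 1 ((allocations.length : Int) + 1) 1) used

-- ===== PRECONDITION & SPEC =====
def Spec_unused (allocations : List Int) (combos : List (List Int)) (out : List Int) : Prop := out = unused_alt allocations combos
instance (allocations : List Int) (combos : List (List Int)) (out : List Int) : Decidable (Spec_unused allocations combos out) := by unfold Spec_unused; infer_instance

-- ===== CLAIM (what is proved, stated in full; the proofs are below) =====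
def Claim_equal_unused : Prop := ∀ (allocations : List Int) (combos : List (List Int)), Dom_unused allocations combos → Spec_unused allocations combos (unused allocations combos)

-- ===== LEMMAS AND PROOFS =====

-- A's used-collection loop is flatten.
theorem pv_used_eq_flatten (combos : List (List Int)) (u : List Int) :
    combos.foldl (fun used combo => combo.foldl (fun used index => used ++ [index]) used) u
      = u ++ combos.flatten := by
  induction combos generalizing u with
  | nil => simp
  | cons c cs ih =>
    rw [List.foldl_cons, PySem.List.foldl_append_singleton, ih, List.append_assoc]
    simp

-- A's second loop is a filter of the shifted range.
theorem pv_filter_loop (used : List Int) (xs : List Int) (acc : List Int) :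
    xs.foldl (fun acc elem => if (elem + 1) ∈ used then acc else acc ++ [elem + 1]) acc
      = acc ++ (xs.map (fun e => e + 1)).filter (fun y => decide (y ∉ used)) := by
  induction xs generalizing acc with
  | nil => simp
  | cons x t ih =>
    by_cases h : (x + 1) ∈ used <;> simp [ih, h, List.append_assoc]

theorem pv_shift_range (n : Nat) :
    (PySem.List.pyRange 0 n 1).map (fun e => e + 1) = PySem.List.pyRange 1 ((n : Int) + 1) 1 := by
  rw [PySem.List.pyRange_one, PySem.List.pyRange_one]
  simp only [Int.sub_zero, Int.add_sub_cancel, Int.toNat_natCast, List.map_map]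
  apply List.map_congr_left
  intro k _
  simp [Function.comp]; omega

-- equation lemmas for the merge scan.
theorem unusedMerge_cons_nil (c : Int) (cs used : List Int)
    (h : used.dropWhile (fun u => decide (u < c)) = []) :
    unusedMerge (c :: cs) used = c :: unusedMerge cs [] := by
  conv_lhs => rw [unusedMerge.eq_def]
  simp only [h]

theorem unusedMerge_cons_cons (c : Int) (cs used : List Int) (u : Int) (t : List Int)
    (h : used.dropWhile (fun u => decide (u < c)) = u :: t) :
    unusedMerge (c :: cs) used
      = if u = c then unusedMerge cs (u :: t) else c :: unusedMerge cs (u :: t) := by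
  conv_lhs => rw [unusedMerge.eq_def]
  simp only [h]

-- the merge scan computes the set difference, for sorted inputs.
theorem pv_merge_eq_filter (cands used : List Int)
    (hc : cands.Pairwise (· < ·)) (hu : used.Pairwise (· ≤ ·)) :
    unusedMerge cands used = cands.filter (fun c => decide (c ∉ used)) := by
  induction cands generalizing used with
  | nil => simp [unusedMerge]
  | cons c cs ih =>
    have hcl : ∀ c' ∈ cs, c < c' := (List.pairwise_cons.mp hc).1
    have hctail : cs.Pairwise (· < ·) := (List.pairwise_cons.mp hc).2
    -- the dropped prefix consists of elements < c
    have hdrop : ∀ x ∈ used.takeWhile (fun u => decide (u < c)), x < c := by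
      intro x hx
      have := List.mem_takeWhile_imp hx
      simpa using this
    have hsplit : used = used.takeWhile (fun u => decide (u < c)) ++ used.dropWhile (fun u => decide (u < c)) :=
      (List.takeWhile_append_dropWhile).symm
    have hrest_sorted : (used.dropWhile (fun u => decide (u < c))).Pairwise (· ≤ ·) :=
      hu.sublist (List.dropWhile_sublist _)
    -- membership in used vs the remaining suffix, for any y with c ≤ y
    have hmem : ∀ y : Int, c ≤ y →
        (y ∈ used ↔ y ∈ used.dropWhile (fun u => decide (u < c))) := by
      intro y hy
      constructor
      · intro h
        rw [hsplit] at h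
        rcases List.mem_append.mp h with h1 | h2
        · exact absurd (hdrop y h1) (by omega)
        · exact h2
      · intro h
        rw [hsplit]
        exact List.mem_append.mpr (Or.inr h)
    cases hrest : used.dropWhile (fun u => decide (u < c)) with
    | nil =>
      -- everything in used is < c, so c and all later candidates are unused
      have hlt : ∀ x ∈ used, x < c := by
        intro x hx
        rw [hsplit, hrest] at hx
        exact hdrop x (by simpa using hx)
      have hcnot : c ∉ used := fun h => absurd (hlt c h) (by omega)
      rw [unusedMerge_cons_nil c cs used hrest, ih [] hctail (by simp)]
      have h2 : List.filter (fun c' => decide (c' ∉ used)) cs = cs := by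
        apply List.filter_eq_self.mpr
        intro c' hc'
        have : c' ∉ used := fun h => absurd (hlt c' h) (by have := hcl c' hc'; omega)
        simp [this]
      rw [List.filter_cons, if_pos (by simp [hcnot]), h2]
      simp
    | cons u t =>
      -- head u of the suffix does not satisfy the while condition: c ≤ u
      have hcu : c ≤ u := by
        have := List.head?_dropWhile_not (fun u => decide (u < c)) used
        rw [hrest] at this
        simp at this
        omega
      have hsorted' : (u :: t).Pairwise (· ≤ ·) := by
        rw [hrest] at hrest_sorted; exact hrest_sorted
      have humin : ∀ x ∈ u :: t, u ≤ x := by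
        intro x hx
        rcases List.mem_cons.mp hx with rfl | hx
        · exact le_refl x
        · exact List.rel_of_pairwise_cons hsorted' hx
      have hcongr : ∀ c' ∈ cs,
          (decide (c' ∉ u :: t)) = (decide (c' ∉ used)) := by
        intro c' hc'
        have h := hmem c' (le_of_lt (hcl c' hc'))
        rw [hrest] at h
        simp [h]
      rw [unusedMerge_cons_cons c cs used u t hrest,
          ih (u :: t) hctail hsorted']
      by_cases hce : u = c
      · -- c is used: skip it
        have hcin : c ∈ used := by
          apply (hmem c (le_refl c)).mpr
          rw [hrest, hce]
          exact List.mem_cons_self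
        rw [if_pos hce, List.filter_cons, if_neg (by simp [hcin]),
            List.filter_congr (fun c' hc' => hcongr c' hc')]
      · -- c < u ≤ everything remaining: c unused
        have hclt : c < u := lt_of_le_of_ne hcu (fun h => hce h.symm)
        have hcnot : c ∉ used := by
          intro h
          have := (hmem c (le_refl c)).mp h
          rw [hrest] at this
          have := humin c this
          omega
        rw [if_neg hce, List.filter_cons, if_pos (by simp [hcnot]),
            List.filter_congr (fun c' hc' => hcongr c' hc')]

theorem unused_spec_aux (allocations : List Int) (combos : List (List Int)) :
    unused allocations combos = unused_alt allocations combos := by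
  unfold unused unused_alt
  rw [pv_used_eq_flatten, pv_filter_loop, pv_shift_range]
  rw [pv_merge_eq_filter _ _ (PySem.List.pairwise_lt_pyRange_one 1 _)
      (by simpa using PySem.List.sorted_pairwise combos.flatten (fun x => x))]
  simp only [List.nil_append]
  apply List.filter_congr
  intro y _
  simp [PySem.List.mem_sorted]

-- ===== VERDICT (by name: the statement is the Claim_ definition above) =====
theorem unused_spec : Claim_equal_unused := by
  intro allocations combos _
  exact unused_spec_aux allocations combos
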